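-- pv_equiv track=rewrite | github.com/ph4r05/keychest-scanner | keychest/tls_domain_tools.py | fqdn
-- ===== SOURCE A (Python) =====
-- def fqdn(hostname):
--     """
--     Removes all wildcards from the hostname
--     :param hostname:
--     :return:
--     """
--     components = hostname.split('.')
--     ret = []
--     for comp in reversed(components):
--         if '*' in comp or '%' in comp:
--             break
--         ret.append(comp)
--
--     return '.'.join(reversed(ret))
-- ===== SOURCE B (Python) =====
-- def fqdn(hostname):
--     """
--     Removes all wildcards from the hostname
--     :param hostname:
--     :return:
--     """
--     ret = []
--     for comp in hostname.split('.'):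
--         if '*' in comp or '%' in comp:
--             ret = []
--         else:
--             ret.append(comp)
--     return '.'.join(ret)
-- ===== Notes on version B (the rewrite author's own statement) =====
-- stated objective: simpler
-- what changed: Single forward pass that resets the accumulator on a wildcard component, replacing A's reverse-scan-with-break plus second reversal for the join.
import Mathlib
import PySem

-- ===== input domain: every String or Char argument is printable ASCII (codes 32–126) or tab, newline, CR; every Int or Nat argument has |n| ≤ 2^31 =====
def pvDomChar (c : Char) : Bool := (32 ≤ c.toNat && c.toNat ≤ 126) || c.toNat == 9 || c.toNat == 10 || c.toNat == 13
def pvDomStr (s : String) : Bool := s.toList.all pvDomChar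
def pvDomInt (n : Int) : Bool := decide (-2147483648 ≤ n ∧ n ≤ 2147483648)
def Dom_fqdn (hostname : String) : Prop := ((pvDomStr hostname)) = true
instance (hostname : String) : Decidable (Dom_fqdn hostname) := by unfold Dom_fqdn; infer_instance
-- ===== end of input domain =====

-- B replaces A's reverse-scan-with-break (plus a second reversal before the join) by one
-- forward pass that resets the accumulator whenever a component carries '*' or '%' (simpler).

-- "'*' in comp or '%' in comp" (shared by both ports, each Python spells it identically)
def pvWild (comp : String) : Bool := PySem.Str.isIn "*" comp || PySem.Str.isIn "%" comp

-- ===== PORT A =====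
-- the for-loop over reversed(components) with its break, accumulating ret in iteration order
def fqdnLoopA (ret : List String) : List String → List String
  | [] => ret
  | comp :: rest => if pvWild comp then ret else fqdnLoopA (ret ++ [comp]) rest

def fqdn (hostname : String) : String :=
  let components := (PySem.Str.split? hostname ".").getD []
  PySem.Str.join "." (fqdnLoopA [] components.reverse).reverse

-- ===== PORT B =====
def fqdn_alt (hostname : String) : String :=
  let components := (PySem.Str.split? hostname ".").getD []
  PySem.Str.join "."
    (components.foldl (fun ret comp => if pvWild comp then [] else ret ++ [comp]) [])

-- ===== PRECONDITION & SPEC =====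
def Spec_fqdn (hostname : String) (out : String) : Prop := out = fqdn_alt hostname
instance (hostname : String) (out : String) : Decidable (Spec_fqdn hostname out) := by unfold Spec_fqdn; infer_instance

-- ===== CLAIM (what is proved, stated in full; the proofs are below) =====
def Claim_equal_fqdn : Prop := ∀ (hostname : String), Dom_fqdn hostname → Spec_fqdn hostname (fqdn hostname)

-- ===== LEMMAS AND PROOFS =====

theorem takeWhile_all {α : Type} (p : α → Bool) (xs : List α) (h : xs.all p) :
    xs.takeWhile p = xs := by
  induction xs with
  | nil => rfl
  | cons x t ih =>
    simp only [List.all_cons, Bool.and_eq_true] at h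
    simp [h.1, ih h.2]

theorem takeWhile_append_one {α : Type} (p : α → Bool) (xs : List α) (c : α) :
    (xs ++ [c]).takeWhile p =
      if xs.all p then xs ++ [c].takeWhile p else xs.takeWhile p := by
  induction xs with
  | nil => simp
  | cons x t ih =>
    by_cases hx : p x = true
    · simp [List.takeWhile_cons, hx, ih]
      split_ifs <;> simp
    · simp [hx]

theorem loopA_eq (ret : List String) (l : List String) :
    fqdnLoopA ret l = ret ++ l.takeWhile (fun c => !pvWild c) := by
  induction l generalizing ret with
  | nil => simp [fqdnLoopA]
  | cons c rest ih =>
    by_cases h : pvWild c = true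
    · simp [fqdnLoopA, h]
    · simp [fqdnLoopA, h, ih]

-- result of the reverse-scan, as a function of the component list
def pvKeep (l : List String) : List String :=
  (l.reverse.takeWhile (fun c => !pvWild c)).reverse

theorem foldl_reset_eq (l : List String) (acc : List String) :
    l.foldl (fun ret comp => if pvWild comp then [] else ret ++ [comp]) acc =
      if l.any pvWild then pvKeep l else acc ++ pvKeep l := by
  induction l generalizing acc with
  | nil => simp [pvKeep]
  | cons c rest ih =>
    have hrev : (c :: rest).reverse = rest.reverse ++ [c] := by simp
    by_cases h : pvWild c = true
    · have hk : pvKeep (c :: rest) = pvKeep rest := by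
        simp only [pvKeep, hrev, takeWhile_append_one]
        split_ifs with hall
        · simp [takeWhile_all _ _ hall, h]
        · rfl
      simp [List.foldl_cons, h, ih, hk]
    · have hk : pvKeep (c :: rest) =
          if rest.any pvWild then pvKeep rest else c :: rest := by
        simp only [pvKeep, hrev, takeWhile_append_one]
        by_cases hall : rest.reverse.all (fun c => !pvWild c) = true
        · have hany : rest.any pvWild = false := by
            simp only [List.all_reverse] at hall
            simp only [List.all_eq_true] at hall
            simp only [List.any_eq_false]
            intro x hx
            simpa using hall x hx
          simp [hall, hany, h]
        · have hany : rest.any pvWild = true := by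
            have hall' : (rest.reverse.all fun c => !pvWild c) = false :=
              Bool.eq_false_iff.mpr hall
            rcases List.all_eq_false.mp hall' with ⟨x, hx, hpx⟩
            exact List.any_eq_true.mpr
              ⟨x, List.mem_reverse.mp hx, by simpa using hpx⟩
          simp [hall, hany]
      simp only [List.foldl_cons, h, ih]
      by_cases hany : rest.any pvWild = true
      · simp [hany, hk, h]
      · simp only [Bool.not_eq_true] at hany
        have hall : rest.reverse.all (fun c => !pvWild c) = true := by
          simp only [List.all_reverse, List.all_eq_true]
          intro x hx
          simp only [List.any_eq_false] at hany
          simpa using hany x hx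
        have : pvKeep rest = rest := by
          simp [pvKeep, takeWhile_all _ _ hall]
        simp [hany, hk, h, this]

-- ===== VERDICT (by name: the statement is the Claim_ definition above) =====
theorem fqdn_spec : Claim_equal_fqdn := by
  intro hostname _
  unfold Spec_fqdn fqdn fqdn_alt
  simp only [loopA_eq, foldl_reset_eq, List.nil_append]
  split_ifs <;> rfl
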